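-- pv_equiv track=rewrite | github.com/kuznetsovvj/education | algorithms/codeforces/1836a.py | check
-- ===== SOURCE A (Python) =====
-- def check(seq):
--     d = {}
--     for i in seq:
--         if i in d:
--             d[i] += 1
--         else:
--             d[i] = 1
--     prev = -1
--     prev_value = float('inf')
--     for k in sorted(d.keys()):
--         if k != prev + 1 or d[k] > prev_value:
--             return "NO"
--         prev = k
--         prev_value = d[k]
--     return "YES"
-- ===== SOURCE B (Python) =====
-- def check(seq):
--     # Sort the input and verify it in one pass: values must form runs 0,1,2,...
--     # with non-increasing run lengths.  No frequency table is built.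
--     s = sorted(seq)
--     if not s:
--         return "YES"
--     if s[0] != 0:
--         return "NO"
--     prev = s[0]
--     run = 1
--     prev_run = None
--     for cur in s[1:]:
--         if cur == prev:
--             run += 1
--         elif cur == prev + 1:
--             if prev_run is not None and run > prev_run:
--                 return "NO"
--             prev_run, run, prev = run, 1, cur
--         else:
--             return "NO"
--     if prev_run is not None and run > prev_run:
--         return "NO"
--     return "YES"
-- ===== Notes on version B (the rewrite author's own statement) =====
-- stated objective: alternative
-- what changed: B sorts the whole input and validates it in a single left-to-right pass comparing each element with its predecessor (run-length state machine), instead of A's frequency dictionary followed by a loop over the sorted distinct keys.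
import Mathlib
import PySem

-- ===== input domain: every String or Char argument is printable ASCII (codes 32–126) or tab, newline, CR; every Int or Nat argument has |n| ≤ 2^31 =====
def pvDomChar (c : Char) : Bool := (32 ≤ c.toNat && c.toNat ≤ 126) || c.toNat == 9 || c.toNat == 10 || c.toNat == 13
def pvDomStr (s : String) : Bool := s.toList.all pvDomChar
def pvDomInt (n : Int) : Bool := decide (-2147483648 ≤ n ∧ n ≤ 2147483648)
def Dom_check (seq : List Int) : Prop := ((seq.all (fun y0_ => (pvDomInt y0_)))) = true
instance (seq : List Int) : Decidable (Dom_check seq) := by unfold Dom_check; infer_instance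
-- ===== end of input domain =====

-- B replaces A's frequency-dict-then-sorted-key-loop by a single predecessor-comparing pass over the sorted input (alternative decomposition, same result).

-- ===== PORT A =====
-- Python's float('inf') initial prev_value is modeled as Option Int 'none': it is only
-- ever used in the comparison 'd[k] > prev_value', which is False while it is infinity.
def gtPrevA (x : Int) : Option Int → Bool
  | none => false
  | some p => decide (x > p)

def checkLoopA (d : PySem.Dict Int Int) : List Int → Int → Option Int → String
  | [], _, _ => "YES"
  | k :: ks, prev, prevValue =>
    if (k != prev + 1) || gtPrevA (d.getD k 0) prevValue then "NO"
    else checkLoopA d ks k (some (d.getD k 0))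

def check (seq : List Int) : String :=
  let d := seq.foldl (fun d i =>
    if d.contains i then d.insert i (d.getD i 0 + 1) else d.insert i 1) PySem.Dict.empty
  checkLoopA d (PySem.List.sorted d.keys (fun x => x) false) (-1) none

-- ===== PORT B =====
-- 'prev_run is not None and run > prev_run'
def badRunB (run : Int) : Option Int → Bool
  | none => false
  | some p => decide (run > p)

def scanB : List Int → Int → Int → Option Int → String
  | [], _, run, prevRun =>
    if badRunB run prevRun then "NO" else "YES"
  | cur :: t, prev, run, prevRun =>
    if cur == prev then scanB t prev (run + 1) prevRun
    else if cur == prev + 1 then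
      if badRunB run prevRun then "NO"
      else scanB t cur 1 (some run)
    else "NO"

def check_alt (seq : List Int) : String :=
  match PySem.List.sorted seq (fun x => x) false with
  | [] => "YES"
  | x :: rest => if x ≠ 0 then "NO" else scanB rest x 1 none

-- ===== PRECONDITION & SPEC =====
def Spec_check (seq : List Int) (out : String) : Prop := out = check_alt seq
instance (seq : List Int) (out : String) : Decidable (Spec_check seq out) := by unfold Spec_check; infer_instance

-- ===== CLAIM (what is proved, stated in full; the proofs are below) =====
def Claim_equal_check : Prop := ∀ (seq : List Int), Dom_check seq → Spec_check seq (check seq)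

-- ===== LEMMAS AND PROOFS =====

-- the sorted distinct values of a list (A's sorted dict keys; B's run heads)
def sortedDedup (s : List Int) : List Int :=
  PySem.List.sorted (PySem.Set.ofList s) (fun x => x) false

theorem gtPrevA_eq_badRunB (x : Int) (pr : Option Int) : gtPrevA x pr = badRunB x pr := by
  cases pr <;> rfl

theorem scanB_replicate (c : Nat) (v : Int) (rest : List Int) (run : Int) (pr : Option Int) :
    scanB (List.replicate c v ++ rest) v run pr = scanB rest v (run + c) pr := by
  induction c generalizing run with
  | zero => simp
  | succ c ih =>
      have harith : run + 1 + (c : Int) = run + ((c + 1 : Nat) : Int) := by push_cast; ring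
      simp only [List.replicate_succ, List.cons_append, scanB, beq_self_eq_true, if_pos, ih]
      rw [harith]

theorem run_decomp (v : Int) (xs : List Int) (hs : xs.Pairwise (· ≤ ·))
    (hge : ∀ k ∈ xs, v ≤ k) :
    ∃ c rest, xs = List.replicate c v ++ rest ∧ (∀ k ∈ rest, v < k) ∧
      rest.Pairwise (· ≤ ·) := by
  refine ⟨(xs.takeWhile (· == v)).length, xs.dropWhile (· == v), ?_, ?_, ?_⟩
  · conv_lhs => rw [← List.takeWhile_append_dropWhile (p := (· == v)) (l := xs)]
    congr 1
    apply List.eq_replicate_of_mem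
    intro b hb
    have := List.mem_takeWhile_imp hb
    simpa using this
  · intro k hk
    have hsub : (xs.dropWhile (· == v)).Sublist xs := List.dropWhile_sublist _
    cases hrest : xs.dropWhile (· == v) with
    | nil => rw [hrest] at hk; simp at hk
    | cons h t =>
        have hhead : ¬ (h == v) = true := by
          have := List.head?_dropWhile_not (p := (· == v)) (l := xs)
          rw [hrest] at this
          simpa using this
        have hne : h ≠ v := by simpa using hhead
        have hvh : v < h := lt_of_le_of_ne (hge h (hsub.mem (by rw [hrest]; simp))) (Ne.symm hne)
        rw [hrest] at hk
        rcases List.mem_cons.mp hk with rfl | hk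
        · exact hvh
        · have hp : (h :: t).Pairwise (· ≤ ·) := by
            rw [← hrest]; exact hs.sublist hsub
          exact lt_of_lt_of_le hvh ((List.pairwise_cons.mp hp).1 k hk)
  · exact hs.sublist (List.dropWhile_sublist _)

theorem sortedDedup_run (v : Int) (c : Nat) (rest : List Int)
    (hrest : ∀ k ∈ rest, v < k) :
    sortedDedup (List.replicate (c + 1) v ++ rest) = v :: sortedDedup rest := by
  unfold sortedDedup
  apply PySem.List.sorted_eq_of_perm_of_pairwise_lt
  · rw [List.perm_ext_iff_of_nodup]
    · intro a
      simp only [PySem.Set.mem_ofList, List.mem_cons, PySem.List.mem_sorted, List.mem_append,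
        List.mem_replicate, Nat.succ_ne_zero, ne_eq, not_false_eq_true, true_and]
    · rw [List.nodup_cons]
      constructor
      · intro h
        have : v ∈ rest := by simpa [PySem.List.mem_sorted, PySem.Set.mem_ofList] using h
        exact absurd (hrest v this) (lt_irrefl v)
      · exact ((PySem.List.sorted_perm _ _ _).nodup_iff).mpr (PySem.Set.nodup_ofList rest)
    · exact PySem.Set.nodup_ofList _
  · rw [List.pairwise_cons]
    refine ⟨?_, ?_⟩
    · intro a ha
      exact hrest a (by simpa [PySem.List.mem_sorted, PySem.Set.mem_ofList] using ha)
    · exact PySem.List.sorted_ofList_pairwise_lt rest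

theorem align_nil (d : PySem.Dict Int Int) (v cnt : Int) (pr : Option Int)
    (hv : d.getD v 0 = cnt) :
    scanB [] v cnt pr = checkLoopA d (v :: sortedDedup []) (v - 1) pr := by
  have h1 : sortedDedup ([] : List Int) = [] := rfl
  rw [h1]
  have h2 : (v != v - 1 + 1) = false := by simp
  simp only [scanB, checkLoopA, hv, gtPrevA_eq_badRunB, h2, Bool.false_or]

theorem main_align (d : PySem.Dict Int Int) :
    ∀ n (s : List Int), s.length ≤ n → s.Pairwise (· ≤ ·) → ∀ (v cnt : Int) (pr : Option Int),
    (∀ k ∈ s, v < k) → d.getD v 0 = cnt → (∀ k ∈ s, d.getD k 0 = (s.count k : Int)) →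
    scanB s v cnt pr = checkLoopA d (v :: sortedDedup s) (v - 1) pr := by
  intro n
  induction n with
  | zero =>
      intro s hlen _ v cnt pr _ hv _
      have hs : s = [] := List.length_eq_zero_iff.mp (Nat.le_zero.mp hlen)
      subst hs
      exact align_nil d v cnt pr hv
  | succ m ih =>
      intro s hlen hsort v cnt pr hlt hv hcnt
      cases s with
      | nil => exact align_nil d v cnt pr hv
      | cons x xs =>
          obtain ⟨hx_le, hxs_pair⟩ := List.pairwise_cons.mp hsort
          obtain ⟨c, rest, hxs, hrest_lt, hrest_pair⟩ := run_decomp x xs hxs_pair hx_le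
          have hvx : v < x := hlt x List.mem_cons_self
          have hxv : (x == v) = false := by simp; omega
          have hsd : sortedDedup (x :: xs) = x :: sortedDedup rest := by
            have h : x :: xs = List.replicate (c + 1) x ++ rest := by
              rw [hxs, List.replicate_succ, List.cons_append]
            rw [h, sortedDedup_run x c rest hrest_lt]
          have hrest0 : rest.count x = 0 :=
            List.count_eq_zero.mpr (fun h => absurd (hrest_lt x h) (lt_irrefl x))
          have hcx : d.getD x 0 = (1 : Int) + (c : Int) := by
            have h := hcnt x List.mem_cons_self
            rw [hxs] at h
            simp [List.count_append, hrest0] at h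
            rw [h]; ring
          have hveq : (v != v - 1 + 1) = false := by simp
          by_cases hx1 : x = v + 1
          · have hx1b : (x == v + 1) = true := by simpa using hx1
            by_cases hbad : badRunB cnt pr = true
            · have hL : scanB (x :: xs) v cnt pr = "NO" := by
                simp only [scanB, hxv, Bool.false_eq_true, if_false, hx1b, if_true, hbad]
              have hR : checkLoopA d (v :: sortedDedup (x :: xs)) (v - 1) pr = "NO" := by
                simp only [checkLoopA, hv, gtPrevA_eq_badRunB, hveq, Bool.false_or, hbad, if_true]
              rw [hL, hR]
            · have hbad' : badRunB cnt pr = false := by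
                cases h : badRunB cnt pr
                · rfl
                · exact absurd h hbad
              -- LHS
              have hL : scanB (x :: xs) v cnt pr = scanB rest x ((1 : Int) + (c : Int)) (some cnt) := by
                simp only [scanB, hxv, Bool.false_eq_true, if_false, hx1b, if_true, hbad']
                rw [hxs, scanB_replicate]
              -- RHS
              have hR : checkLoopA d (v :: sortedDedup (x :: xs)) (v - 1) pr
                  = checkLoopA d (x :: sortedDedup rest) v (some cnt) := by
                simp only [checkLoopA, hv, gtPrevA_eq_badRunB, hveq, Bool.false_or, hbad',
                  Bool.false_eq_true, if_false, hsd]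
              rw [hL, hR]
              have hlen' : rest.length ≤ m := by
                have h1 : xs.length = c + rest.length := by rw [hxs]; simp
                have h2 : (x :: xs).length = xs.length + 1 := by simp
                omega
              have hcnt' : ∀ k ∈ rest, d.getD k 0 = (rest.count k : Int) := by
                intro k hk
                have hkx : x < k := hrest_lt k hk
                have hkmem : k ∈ x :: xs := by
                  rw [hxs]; exact List.mem_cons_of_mem _ (List.mem_append_right _ hk)
                have h := hcnt k hkmem
                rw [hxs] at h
                have hkx' : k ≠ x := by omega
                simp [List.count_append, List.count_replicate, Ne.symm hkx'] at h
                exact h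
              have := ih rest hlen' hrest_pair x (d.getD x 0) (some cnt)
                hrest_lt rfl hcnt'
              rw [hcx] at this
              have hxm1 : x - 1 = v := by omega
              rw [hxm1] at this
              exact this
          · have hx1b : (x == v + 1) = false := by simpa using hx1
            have hL : scanB (x :: xs) v cnt pr = "NO" := by
              simp only [scanB, hxv, Bool.false_eq_true, if_false, hx1b]
            have hxne : (x != v + 1) = true := by simpa using hx1
            have hR : checkLoopA d (v :: sortedDedup (x :: xs)) (v - 1) pr = "NO" := by
              by_cases hbad : badRunB cnt pr = true
              · simp only [checkLoopA, hv, gtPrevA_eq_badRunB, hveq, Bool.false_or, hbad, if_true]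
              · have hbad' : badRunB cnt pr = false := by
                  cases h : badRunB cnt pr
                  · rfl
                  · exact absurd h hbad
                simp only [checkLoopA, hv, gtPrevA_eq_badRunB, hveq, Bool.false_or, hbad',
                  Bool.false_eq_true, if_false, hsd, hxne, Bool.true_or, if_true]
            rw [hL, hR]

theorem getD_zero_of_not_contains (d : PySem.Dict Int Int) (i : Int) (h : d.contains i = false) :
    d.getD i 0 = 0 := by
  have := PySem.Dict.contains_eq_isSome_get? (d := d) (k := i)
  rw [h] at this
  have h2 : d.get? i = none := by
    cases hg : d.get? i with
    | none => rfl
    | some v => rw [hg] at this; simp at this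
  simp [PySem.Dict.getD, h2]

theorem fold_eq_counter (seq : List Int) :
    seq.foldl (fun d i =>
      if d.contains i then d.insert i (d.getD i 0 + 1) else d.insert i 1) PySem.Dict.empty
    = PySem.Dict.counter seq := by
  have hstep : (fun (d : PySem.Dict Int Int) (i : Int) =>
      if d.contains i then d.insert i (d.getD i 0 + 1) else d.insert i 1)
      = fun d x => d.insert x (d.getD x 0 + 1) := by
    funext d i
    by_cases h : d.contains i
    · simp [h]
    · simp only [h, Bool.false_eq_true, if_false, getD_zero_of_not_contains d i (by simp [h]), zero_add]
  rw [hstep, PySem.Dict.foldl_insert_getD_add_one_eq_counter]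

theorem check_eq_alt (seq : List Int) : check seq = check_alt seq := by
  have hA : check seq = checkLoopA (PySem.Dict.counter seq)
      (PySem.List.sorted (PySem.Set.ofList seq) (fun x => x) false) (-1) none := by
    have hA0 : check seq = checkLoopA (PySem.Dict.counter seq)
        (PySem.List.sorted (PySem.Dict.counter seq).keys (fun x => x) false) (-1) none := by
      unfold check
      rw [fold_eq_counter]
    rw [hA0, PySem.Dict.keys_counter]
  have hkeys : PySem.List.sorted (PySem.Set.ofList seq) (fun x => x) false
      = sortedDedup (PySem.List.sorted seq (fun x => x) false) := by
    unfold sortedDedup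
    apply PySem.List.sorted_eq_sorted_of_perm _ _ _ (fun a b h => h)
    rw [List.perm_ext_iff_of_nodup (PySem.Set.nodup_ofList _) (PySem.Set.nodup_ofList _)]
    intro a
    simp [PySem.Set.mem_ofList, PySem.List.mem_sorted]
  have hcountd : ∀ k, (PySem.Dict.counter seq).getD k 0
      = ((PySem.List.sorted seq (fun x => x) false).count k : Int) := by
    intro k
    rw [PySem.Dict.getD_counter]
    congr 1
    exact ((PySem.List.sorted_perm seq (fun x => x) false).count_eq k).symm
  rw [hA, hkeys]
  unfold check_alt
  have hpair : (PySem.List.sorted seq (fun x => x) false).Pairwise (· ≤ ·) :=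
    PySem.List.sorted_pairwise seq (fun x => x)
  cases hsplit : PySem.List.sorted seq (fun x => x) false with
  | nil =>
      have : sortedDedup [] = [] := rfl
      rw [hsplit] at *
      rw [this]
      rfl
  | cons x xs =>
      rw [hsplit] at hpair hcountd
      obtain ⟨hx_le, hxs_pair⟩ := List.pairwise_cons.mp hpair
      obtain ⟨c, rest, hxs, hrest_lt, hrest_pair⟩ := run_decomp x xs hxs_pair hx_le
      have hsd : sortedDedup (x :: xs) = x :: sortedDedup rest := by
        have h : x :: xs = List.replicate (c + 1) x ++ rest := by
          rw [hxs, List.replicate_succ, List.cons_append]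
        rw [h, sortedDedup_run x c rest hrest_lt]
      have hrest0 : rest.count x = 0 :=
        List.count_eq_zero.mpr (fun h => absurd (hrest_lt x h) (lt_irrefl x))
      have hcx : (PySem.Dict.counter seq).getD x 0 = (1 : Int) + (c : Int) := by
        rw [hcountd x, hxs]
        simp [List.count_append, hrest0]
        omega
      by_cases hx0 : x = 0
      · -- A's first key passes; align the rest
        subst hx0
        rw [hsd]
        have hcnt' : ∀ k ∈ rest, (PySem.Dict.counter seq).getD k 0 = (rest.count k : Int) := by
          intro k hk
          have hkx : (0 : Int) < k := hrest_lt k hk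
          have hkx' : k ≠ 0 := by omega
          rw [hcountd k, hxs]
          simp [List.count_cons, List.count_append, List.count_replicate]
          rw [if_neg (Ne.symm hkx'), if_neg (Ne.symm hkx')]
          omega
        have halign := main_align (PySem.Dict.counter seq) rest.length rest le_rfl
          hrest_pair 0 ((PySem.Dict.counter seq).getD 0 0) none hrest_lt rfl hcnt'
        have hB : scanB xs 0 1 none = scanB rest 0 ((1 : Int) + (c : Int)) none := by
          rw [hxs, scanB_replicate]
        have h01 : ((0 : Int) - 1) = (-1 : Int) := by norm_num
        rw [h01] at halign
        show checkLoopA (PySem.Dict.counter seq) (0 :: sortedDedup rest) (-1) none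
          = if (0 : Int) ≠ 0 then "NO" else scanB xs 0 1 none
        rw [if_neg (by omega : ¬ (0 : Int) ≠ 0), hB, ← hcx]
        exact halign.symm
      · -- A's first key fails the consecutive test; both "NO"
        have hxne : (x != -1 + 1) = true := by simp; omega
        rw [hsd]
        simp only [checkLoopA, hxne, Bool.true_or, if_true, ne_eq, hx0, not_false_eq_true,
          if_true]

-- ===== VERDICT (by name: the statement is the Claim_ definition above) =====
theorem check_spec : Claim_equal_check := by
  intro seq _
  exact check_eq_alt seq
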